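-- pv_equiv track=rewrite | github.com/jiahao0525/- | 攀登者2.py | count_climbable_peaks
-- ===== SOURCE A (Python) =====
-- def count_climbable_peaks(map_arr, stamina):
--     """
--     计算在给定体力下可以安全攀登的山峰数量。
--
--     参数：
--         map_arr: 表示地图高度的一维数组。
--         stamina: 登山者的体力值。
--
--     返回：
--         可以安全攀登的山峰数量。
--     """
--
--     peaks = []  # 存储山峰信息（位置，高度）
--     n = len(map_arr)
--
--     # 识别山峰
--     for i in range(n):
--         # 判断当前位置是否为山峰：高于两侧或位于边界且高于相邻位置
--         if (i == 0 or map_arr[i] > map_arr[i - 1]) and (i == n - 1 or map_arr[i] > map_arr[i + 1]):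
--             peaks.append((i, map_arr[i]))
--
--     climbable_peaks = 0  # 可攀登的山峰数量
--
--     # 计算体力消耗并判断是否可攀登
--     for peak_pos, peak_height in peaks:
--         climb_cost_left = climb_cost_right = descend_cost_left = descend_cost_right = 0
--
--         # 计算从左侧攀登和下山的体力消耗
--         for i in range(peak_pos - 1, -1, -1):  # 从峰顶向左遍历到地面
--             climb_cost_left += 2 * max(0, map_arr[i + 1] - map_arr[i])  # 上山消耗体力为高度差的两倍
--             descend_cost_left += max(0, map_arr[i + 1] - map_arr[i])  # 下山消耗体力为高度差
--
--         # 计算从右侧攀登和下山的体力消耗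
--         for i in range(peak_pos + 1, n):  # 从峰顶向右遍历到地面
--             climb_cost_right += 2 * max(0, map_arr[i] - map_arr[i - 1])
--             descend_cost_right += max(0, map_arr[i] - map_arr[i - 1])
--
--         # 判断是否可以安全攀登：
--         # 选择左右两侧消耗体力较小的路径，判断总消耗是否小于等于体力值
--         if min(climb_cost_left, climb_cost_right) + min(descend_cost_left, descend_cost_right) <= stamina:
--             climbable_peaks += 1
--
--     return climbable_peaks
-- ===== SOURCE B (Python) =====
-- def count_climbable_peaks(map_arr, stamina):
--     """O(n) re-implementation: prefix sums of positive adjacent differences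
--     give each peak's cheaper-side cost in O(1)."""
--     n = len(map_arr)
--     diffs = [max(0, map_arr[j] - map_arr[j - 1]) for j in range(1, n)]
--     total = sum(diffs)
--     pref = 0
--     count = 0
--     for i in range(n):
--         if i > 0:
--             pref += diffs[i - 1]
--         if (i == 0 or map_arr[i] > map_arr[i - 1]) and (i == n - 1 or map_arr[i] > map_arr[i + 1]):
--             # cheaper side: climb = 2*min(pref, total-pref), descend = min(pref, total-pref)
--             if 3 * min(pref, total - pref) <= stamina:
--                 count += 1
--     return count
-- ===== Notes on version B (the rewrite author's own statement) =====
-- stated objective: faster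
-- what changed: Replaced the per-peak left/right rescans with one pass over prefix sums of positive adjacent height differences, so each peak's cheaper-side cost (3*min(pref, total-pref)) is computed in O(1).
import Mathlib
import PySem

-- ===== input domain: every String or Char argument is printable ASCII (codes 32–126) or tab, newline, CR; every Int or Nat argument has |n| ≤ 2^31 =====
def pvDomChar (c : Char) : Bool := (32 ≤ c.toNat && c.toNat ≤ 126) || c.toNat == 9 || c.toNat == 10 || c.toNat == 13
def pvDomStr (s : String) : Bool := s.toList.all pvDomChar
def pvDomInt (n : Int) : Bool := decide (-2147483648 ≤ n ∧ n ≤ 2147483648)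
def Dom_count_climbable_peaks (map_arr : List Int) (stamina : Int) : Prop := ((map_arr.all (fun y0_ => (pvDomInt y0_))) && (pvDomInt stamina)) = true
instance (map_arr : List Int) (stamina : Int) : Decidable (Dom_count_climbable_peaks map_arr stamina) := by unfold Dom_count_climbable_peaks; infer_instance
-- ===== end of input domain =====

-- B replaces A's per-peak left/right rescans by one pass over prefix sums of the
-- positive adjacent height differences (objective: faster, O(n^2) → O(n)).

-- ===== PORT A =====
def count_climbable_peaks (map_arr : List Int) (stamina : Int) : Int :=
  let n : Int := map_arr.length
  -- identify peaks (position, height)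
  let peaks : List (Int × Int) :=
    (PySem.List.pyRange 0 n 1).foldl (fun acc i =>
      if (i = 0 ∨ PySem.List.pyGetD map_arr i 0 > PySem.List.pyGetD map_arr (i - 1) 0) ∧
         (i = n - 1 ∨ PySem.List.pyGetD map_arr i 0 > PySem.List.pyGetD map_arr (i + 1) 0)
      then acc ++ [(i, PySem.List.pyGetD map_arr i 0)] else acc) []
  -- per peak, rescan both sides for climb/descend costs
  peaks.foldl (fun climbable pk =>
    let lcost : Int × Int :=
      (PySem.List.pyRange (pk.1 - 1) (-1) (-1)).foldl (fun (st : Int × Int) i =>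
        (st.1 + 2 * max 0 (PySem.List.pyGetD map_arr (i + 1) 0 - PySem.List.pyGetD map_arr i 0),
         st.2 + max 0 (PySem.List.pyGetD map_arr (i + 1) 0 - PySem.List.pyGetD map_arr i 0))) (0, 0)
    let rcost : Int × Int :=
      (PySem.List.pyRange (pk.1 + 1) n 1).foldl (fun (st : Int × Int) i =>
        (st.1 + 2 * max 0 (PySem.List.pyGetD map_arr i 0 - PySem.List.pyGetD map_arr (i - 1) 0),
         st.2 + max 0 (PySem.List.pyGetD map_arr i 0 - PySem.List.pyGetD map_arr (i - 1) 0))) (0, 0)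
    if min lcost.1 rcost.1 + min lcost.2 rcost.2 ≤ stamina then climbable + 1 else climbable) 0

-- ===== PORT B =====
def count_climbable_peaks_alt (map_arr : List Int) (stamina : Int) : Int :=
  let n : Int := map_arr.length
  let diffs : List Int :=
    (PySem.List.pyRange 1 n 1).map (fun j =>
      max 0 (PySem.List.pyGetD map_arr j 0 - PySem.List.pyGetD map_arr (j - 1) 0))
  let total : Int := diffs.sum
  ((PySem.List.pyRange 0 n 1).foldl (fun (st : Int × Int) i =>
    let pref := if i > 0 then st.1 + PySem.List.pyGetD diffs (i - 1) 0 else st.1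
    let count :=
      if ((i = 0 ∨ PySem.List.pyGetD map_arr i 0 > PySem.List.pyGetD map_arr (i - 1) 0) ∧
          (i = n - 1 ∨ PySem.List.pyGetD map_arr i 0 > PySem.List.pyGetD map_arr (i + 1) 0)) ∧
         3 * min pref (total - pref) ≤ stamina
      then st.2 + 1 else st.2
    (pref, count)) (0, 0)).2

-- ===== PRECONDITION & SPEC =====
def Spec_count_climbable_peaks (map_arr : List Int) (stamina : Int) (out : Int) : Prop := out = count_climbable_peaks_alt map_arr stamina
instance (map_arr : List Int) (stamina : Int) (out : Int) : Decidable (Spec_count_climbable_peaks map_arr stamina out) := by unfold Spec_count_climbable_peaks; infer_instance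

-- ===== CLAIM (what is proved, stated in full; the proofs are below) =====
def Claim_equal_count_climbable_peaks : Prop := ∀ (map_arr : List Int) (stamina : Int), Dom_count_climbable_peaks map_arr stamina → Spec_count_climbable_peaks map_arr stamina (count_climbable_peaks map_arr stamina)

-- ===== LEMMAS AND PROOFS =====

def pvM (a : List Int) (i : Int) : Int :=
  max 0 (PySem.List.pyGetD a (i + 1) 0 - PySem.List.pyGetD a i 0)

def pvS (a : List Int) (p : Int) : Int :=
  ((PySem.List.pyRange 0 p 1).map (pvM a)).sum

-- generic pair-accumulating fold: (climb, descend) += (2*f i, f i)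
theorem pvPairFold (l : List Int) (f : Int → Int) (x y : Int) :
    l.foldl (fun (st : Int × Int) i => (st.1 + 2 * f i, st.2 + f i)) (x, y)
      = (x + 2 * (l.map f).sum, y + (l.map f).sum) := by
  induction l generalizing x y with
  | nil => simp
  | cons h t ih =>
    simp only [List.foldl_cons, List.map_cons, List.sum_cons]
    rw [ih]
    rw [Prod.mk.injEq]; constructor <;> ring

-- shift: sum of pvM (i-1) over [q, b) = sum of pvM over [q-1, b-1)
theorem pvShift (a : List Int) (q b : Int) :
    ((PySem.List.pyRange q b 1).map (fun i => pvM a (i - 1))).sum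
      = ((PySem.List.pyRange (q - 1) (b - 1) 1).map (pvM a)).sum := by
  rw [PySem.List.pyRange_one, PySem.List.pyRange_one]
  simp only [List.map_map]
  have h : b - q = (b - 1) - (q - 1) := by ring
  rw [h]
  congr 1
  apply List.map_congr_left
  intro k _
  simp only [Function.comp]
  congr 1
  ring

-- left cost fold evaluates to (2 * pvS a p, pvS a p)
theorem pvLeft (a : List Int) (p : Int) :
    (PySem.List.pyRange (p - 1) (-1) (-1)).foldl (fun (st : Int × Int) i =>
        (st.1 + 2 * pvM a i, st.2 + pvM a i)) (0, 0)
      = (2 * pvS a p, pvS a p) := by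
  rw [pvPairFold, PySem.List.pyRange_neg_one_eq_reverse]
  simp only [List.map_reverse, List.sum_reverse]
  norm_num [pvS]

-- right cost fold evaluates to (2 * R, R), R = sum of pvM over [p, n-1)
theorem pvRight (a : List Int) (p n : Int) :
    (PySem.List.pyRange (p + 1) n 1).foldl (fun (st : Int × Int) i =>
        (st.1 + 2 * pvM a (i - 1), st.2 + pvM a (i - 1))) (0, 0)
      = (2 * ((PySem.List.pyRange p (n - 1) 1).map (pvM a)).sum,
         ((PySem.List.pyRange p (n - 1) 1).map (pvM a)).sum) := by
  rw [pvPairFold (f := fun i => pvM a (i - 1)), pvShift]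
  norm_num

-- split: total = pvS p + right sum, for 0 ≤ p ≤ n-1
theorem pvSplit (a : List Int) (p n : Int) (h1 : 0 ≤ p) (h2 : p ≤ n - 1) :
    pvS a (n - 1) = pvS a p + ((PySem.List.pyRange p (n - 1) 1).map (pvM a)).sum := by
  unfold pvS
  rw [PySem.List.pyRange_one_append 0 p (n - 1) h1 h2]
  simp

-- B's total equals pvS a (n-1)
theorem pvTotal (a : List Int) (n : Int) :
    (((PySem.List.pyRange 1 n 1).map (fun j =>
        max 0 (PySem.List.pyGetD a j 0 - PySem.List.pyGetD a (j - 1) 0))).sum)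
      = pvS a (n - 1) := by
  have : ((PySem.List.pyRange 1 n 1).map (fun j =>
        max 0 (PySem.List.pyGetD a j 0 - PySem.List.pyGetD a (j - 1) 0)))
      = ((PySem.List.pyRange 1 n 1).map (fun j => pvM a (j - 1))) := by
    apply List.map_congr_left
    intro j _
    simp [pvM]
  rw [this, pvShift]
  norm_num [pvS]

-- building a list with 'if p(x): out.append(f(x))' is filter-then-map (Prop test)
theorem pvAppendIte {p : Int → Prop} [DecidablePred p] (f : Int → Int × Int)
    (l : List Int) (acc : List (Int × Int)) :
    l.foldl (fun acc x => if p x then acc ++ [f x] else acc) acc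
      = acc ++ (l.filter (fun x => decide (p x))).map f := by
  induction l generalizing acc with
  | nil => simp
  | cons h t ih =>
    simp only [List.foldl_cons, List.filter_cons]
    by_cases hp : p h <;> simp [hp, ih]

-- counting over a filtered-and-mapped list is one counting fold
theorem pvCountFilter {p : Int → Prop} [DecidablePred p] {q : Int → Prop} [DecidablePred q]
    (l : List Int) (c : Int) :
    (l.filter (fun x => decide (p x))).foldl (fun c x => if q x then c + 1 else c) c
      = l.foldl (fun c x => if p x ∧ q x then c + 1 else c) c := by
  induction l generalizing c with
  | nil => rfl
  | cons h t ih =>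
    simp only [List.filter_cons]
    by_cases hp : p h
    · by_cases hq : q h <;> simp [hp, hq, ih]
    · simp [hp, ih]

theorem pvS_nonpos (a : List Int) (p : Int) (h : p ≤ 0) : pvS a p = 0 := by
  simp [pvS, PySem.List.pyRange_one_eq_nil h]

theorem pvS_succ (a : List Int) (p : Int) (h : 0 ≤ p) :
    pvS a (p + 1) = pvS a p + pvM a p := by
  unfold pvS
  rw [PySem.List.pyRange_one_succ_right h]
  simp

theorem pvBInv (a : List Int) (s total : Int) (diffs : List Int)
    (hd : diffs = (PySem.List.pyRange 1 (a.length : Int) 1).map (fun j =>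
        max 0 (PySem.List.pyGetD a j 0 - PySem.List.pyGetD a (j - 1) 0)))
    (k : Nat) (hk : (k : Int) ≤ (a.length : Int)) :
    (PySem.List.pyRange 0 (k : Int) 1).foldl (fun (st : Int × Int) i =>
        let pref := if i > 0 then st.1 + PySem.List.pyGetD diffs (i - 1) 0 else st.1
        let count :=
          if ((i = 0 ∨ PySem.List.pyGetD a i 0 > PySem.List.pyGetD a (i - 1) 0) ∧
              (i = (a.length : Int) - 1 ∨ PySem.List.pyGetD a i 0 > PySem.List.pyGetD a (i + 1) 0)) ∧
             3 * min pref (total - pref) ≤ s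
          then st.2 + 1 else st.2
        (pref, count)) (0, 0)
      = (pvS a ((k : Int) - 1),
         (PySem.List.pyRange 0 (k : Int) 1).foldl (fun c i =>
           if ((i = 0 ∨ PySem.List.pyGetD a i 0 > PySem.List.pyGetD a (i - 1) 0) ∧
               (i = (a.length : Int) - 1 ∨ PySem.List.pyGetD a i 0 > PySem.List.pyGetD a (i + 1) 0)) ∧
              3 * min (pvS a i) (total - pvS a i) ≤ s
           then c + 1 else c) 0) := by
  induction k with
  | zero =>
    simp [PySem.List.pyRange_one_eq_nil, pvS_nonpos]
  | succ k ih =>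
    have hk' : (k : Int) ≤ (a.length : Int) := by push_cast at hk ⊢; omega
    have hsplit : PySem.List.pyRange 0 ((k + 1 : Nat) : Int) 1
        = PySem.List.pyRange 0 (k : Int) 1 ++ [(k : Int)] := by
      push_cast
      exact PySem.List.pyRange_one_succ_right (by positivity)
    rw [hsplit, List.foldl_append, List.foldl_append, ih hk']
    have hpref : (if (k : Int) > 0 then pvS a ((k : Int) - 1) + PySem.List.pyGetD diffs ((k : Int) - 1) 0
          else pvS a ((k : Int) - 1)) = pvS a (k : Int) := by
      by_cases h0 : (k : Int) > 0
      · have hk1 : 1 ≤ k := by omega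
        have hget : PySem.List.pyGetD diffs ((k : Int) - 1) 0 = pvM a ((k : Int) - 1) := by
          rw [hd]
          have hcast : ((k : Int) - 1) = (((k - 1 : Nat) : Nat) : Int) := by omega
          rw [hcast]
          rw [PySem.List.pyGetD_map_pyRange_one _ 1 (a.length : Int) (k - 1) 0
            (by push_cast at hk ⊢; omega)]
          simp only [pvM]
          congr 2
          · ring_nf
          · ring_nf
        rw [if_pos h0, hget]
        have := pvS_succ a ((k : Int) - 1) (by omega)
        simpa using this.symm
      · have hk0 : (k : Int) = 0 := by omega
        rw [if_neg h0, hk0]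
        simp [pvS_nonpos]
    simp only [List.foldl_cons, List.foldl_nil]
    rw [hpref]
    have : pvS a (((k + 1 : Nat) : Int) - 1) = pvS a (k : Int) := by push_cast; ring_nf
    rw [this]


theorem pvMain (a : List Int) (s : Int) :
    count_climbable_peaks a s = count_climbable_peaks_alt a s := by
  simp only [count_climbable_peaks, count_climbable_peaks_alt]
  rw [pvBInv a s _ _ rfl a.length (le_refl _)]
  rw [pvAppendIte (p := fun i => (i = 0 ∨ PySem.List.pyGetD a i 0 > PySem.List.pyGetD a (i - 1) 0) ∧
        (i = (a.length : Int) - 1 ∨ PySem.List.pyGetD a i 0 > PySem.List.pyGetD a (i + 1) 0))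
      (f := fun i => (i, PySem.List.pyGetD a i 0))]
  rw [List.nil_append, List.foldl_map, pvCountFilter]
  simp only [pvTotal]
  apply PySem.List.foldl_congr_mem'
  intro i hi c
  rw [PySem.List.mem_pyRange_one] at hi
  have hl : (PySem.List.pyRange (i - 1) (-1) (-1)).foldl (fun (st : Int × Int) j =>
      (st.1 + 2 * max 0 (PySem.List.pyGetD a (j + 1) 0 - PySem.List.pyGetD a j 0),
       st.2 + max 0 (PySem.List.pyGetD a (j + 1) 0 - PySem.List.pyGetD a j 0))) (0, 0)
      = (2 * pvS a i, pvS a i) := by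
    simpa [pvM] using pvLeft a i
  have hr : (PySem.List.pyRange (i + 1) (a.length : Int) 1).foldl (fun (st : Int × Int) j =>
      (st.1 + 2 * max 0 (PySem.List.pyGetD a j 0 - PySem.List.pyGetD a (j - 1) 0),
       st.2 + max 0 (PySem.List.pyGetD a j 0 - PySem.List.pyGetD a (j - 1) 0))) (0, 0)
      = (2 * ((PySem.List.pyRange i ((a.length : Int) - 1) 1).map (pvM a)).sum,
         ((PySem.List.pyRange i ((a.length : Int) - 1) 1).map (pvM a)).sum) := by
    have := pvRight a i (a.length : Int)
    simpa [pvM, sub_add_cancel] using this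
  simp only [hl, hr]
  have hsplit := pvSplit a i (a.length : Int) hi.1 (by omega)
  rw [hsplit]
  set R := ((PySem.List.pyRange i ((a.length : Int) - 1) 1).map (pvM a)).sum with hR
  have harith : (min (2 * pvS a i) (2 * R) + min (pvS a i) R ≤ s)
      ↔ (3 * min (pvS a i) (pvS a i + R - pvS a i) ≤ s) := by
    omega
  by_cases hc : (i = 0 ∨ PySem.List.pyGetD a i 0 > PySem.List.pyGetD a (i - 1) 0) ∧
      (i = (a.length : Int) - 1 ∨ PySem.List.pyGetD a i 0 > PySem.List.pyGetD a (i + 1) 0)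
  · simp [hc, harith]
  · simp [hc]

-- ===== VERDICT (by name: the statement is the Claim_ definition above) =====
theorem count_climbable_peaks_spec : Claim_equal_count_climbable_peaks := by
  intro map_arr stamina _
  exact pvMain map_arr stamina
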